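-- pv_equiv track=rewrite | github.com/Anastgerot/Gerdt_Practice | text_processing.py | merge_same_language_sentences
-- ===== SOURCE A (Python) =====
-- from typing import List, Tuple
--
-- def merge_same_language_sentences(sentences: List[str], langs: List[str]) -> Tuple[List[str], List[str]]:
--     if not sentences:
--         return [], []
--
--     merged_sentences = [sentences[0]]
--     merged_langs = [langs[0]]
--
--     for i in range(1, len(sentences)):
--         if langs[i] == merged_langs[-1]:
--             merged_sentences[-1] += " " + sentences[i]
--         else:
--             merged_sentences.append(sentences[i])
--             merged_langs.append(langs[i])
--
--     return merged_sentences, merged_langs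
-- ===== SOURCE B (Python) =====
-- from typing import List, Tuple
--
-- def merge_same_language_sentences(sentences: List[str], langs: List[str]) -> Tuple[List[str], List[str]]:
--     # Staged, index-based algorithm: first compute the cut positions (run
--     # boundaries) of the language sequence, then build both outputs by
--     # slicing between consecutive cuts. No incremental merging state at all.
--     n = len(sentences)
--     cuts = [i for i in range(n + 1) if i == 0 or i == n or langs[i] != langs[i - 1]]
--     merged_sentences = [" ".join(sentences[a:b]) for a, b in zip(cuts, cuts[1:])]
--     merged_langs = [langs[a] for a in cuts[:-1]]
--     return merged_sentences, merged_langs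
-- ===== Notes on version B (the rewrite author's own statement) =====
-- stated objective: alternative
-- what changed: B replaces A's single incremental pass (append-or-extend-the-last-entry with string concatenation) by a staged boundary computation: it first computes the list of cut indices where the language changes, then derives merged_sentences by joining slices between consecutive cuts and merged_langs by indexing langs at each cut.
-- outside the precondition, e.g. on merge_same_language_sentences(['a', 'b'], ['en']): A raises IndexError, B raises IndexError
import Mathlib
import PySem

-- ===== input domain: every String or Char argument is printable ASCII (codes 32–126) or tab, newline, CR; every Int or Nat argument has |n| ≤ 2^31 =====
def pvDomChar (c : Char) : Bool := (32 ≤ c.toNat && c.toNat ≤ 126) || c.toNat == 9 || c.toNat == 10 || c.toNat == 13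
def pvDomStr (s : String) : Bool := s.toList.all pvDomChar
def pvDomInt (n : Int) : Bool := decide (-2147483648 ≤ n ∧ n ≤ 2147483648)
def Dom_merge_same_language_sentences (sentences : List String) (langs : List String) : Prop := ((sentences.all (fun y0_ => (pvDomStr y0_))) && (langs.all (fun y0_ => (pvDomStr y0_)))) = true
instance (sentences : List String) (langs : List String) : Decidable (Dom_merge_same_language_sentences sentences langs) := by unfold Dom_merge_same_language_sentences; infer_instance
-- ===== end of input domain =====

-- Header: B computes the run boundaries (cut indices) of the language sequence first and then
-- builds both outputs by slicing/joining between consecutive cuts, instead of A's incremental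
-- append-or-extend loop; return values proved equal on Pre_.

-- ===== PORT A =====
-- loop body of A: i-th step reads the pair (langs[i], sentences[i]); under
-- Pre_ (len(langs) >= len(sentences)) iterating over the tail of the zip is exact.
def pvStepA (st : List String × List String) (p : String × String) : List String × List String :=
  if p.1 = (st.2.getLast?.getD "") then
    (st.1.dropLast ++ [(st.1.getLast?.getD "") ++ " " ++ p.2], st.2)
  else
    (st.1 ++ [p.2], st.2 ++ [p.1])

def merge_same_language_sentences (sentences : List String) (langs : List String) : List String × List String :=
  if sentences = [] then ([], [])
  else ((langs.zip sentences).drop 1).foldl pvStepA ([sentences.headD ""], [langs.headD ""])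

-- ===== PORT B =====
-- the comprehension condition of Source B: i == 0 or i == n or langs[i] != langs[i-1]
def pvCond (langs : List String) (n : Int) (i : Int) : Bool :=
  i == 0 || i == n || !(PySem.List.pyGetD langs i "" == PySem.List.pyGetD langs (i - 1) "")

def merge_same_language_sentences_alt (sentences : List String) (langs : List String) : List String × List String :=
  let n : Int := sentences.length
  let cuts : List Int := (PySem.List.pyRange 0 (n + 1) 1).filter (pvCond langs n)
  ((cuts.zip (cuts.drop 1)).map (fun p => PySem.Str.join " " (PySem.List.slice sentences (some p.1) (some p.2))),
   cuts.dropLast.map (fun a => PySem.List.pyGetD langs a ""))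

-- ===== PRECONDITION & SPEC =====
-- Pre_ excludes exactly the inputs where A raises IndexError: a non-empty
-- sentences list with fewer langs than sentences (A reads langs[i] for every i < len(sentences)).
def Pre_merge_same_language_sentences (sentences : List String) (langs : List String) : Prop :=
  sentences = [] ∨ sentences.length ≤ langs.length

instance (sentences : List String) (langs : List String) : Decidable (Pre_merge_same_language_sentences sentences langs) := by
  unfold Pre_merge_same_language_sentences; infer_instance

def pvWitness_merge_same_language_sentences : List String × List String :=
  (["Hi there.", "Ca va?", "Bien.", "Bye!"], ["en", "fr", "fr", "en"])

def Spec_merge_same_language_sentences (sentences : List String) (langs : List String) (out : List String × List String) : Prop := out = merge_same_language_sentences_alt sentences langs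
instance (sentences : List String) (langs : List String) (out : List String × List String) : Decidable (Spec_merge_same_language_sentences sentences langs out) := by unfold Spec_merge_same_language_sentences; infer_instance

-- ===== CLAIM (what is proved, stated in full; the proofs are below) =====
def Claim_equal_merge_same_language_sentences : Prop := ∀ (sentences : List String) (langs : List String), Dom_merge_same_language_sentences sentences langs → Pre_merge_same_language_sentences sentences langs → Spec_merge_same_language_sentences sentences langs (merge_same_language_sentences sentences langs)

-- ===== LEMMAS AND PROOFS =====

-- ---- " ".join facts ----
theorem joinSp_cons_cons (a b : String) (r : List String) :
    PySem.Str.join " " (a :: b :: r) = a ++ " " ++ PySem.Str.join " " (b :: r) := by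
  apply String.toList_inj.mp
  simp [PySem.Str.toList_join, PySem.Chars.join_cons_cons]

theorem joinSp_snoc (a : String) (ss : List String) (s : String) :
    PySem.Str.join " " ((a :: ss) ++ [s]) = PySem.Str.join " " (a :: ss) ++ " " ++ s := by
  induction ss generalizing a with
  | nil =>
      apply String.toList_inj.mp
      simp [PySem.Str.toList_join, PySem.Chars.join_cons_cons, PySem.Chars.join_singleton]
  | cons b tt ih =>
      have h1 : PySem.Str.join " " ((a :: b :: tt) ++ [s])
          = a ++ " " ++ PySem.Str.join " " ((b :: tt) ++ [s]) := by
        apply String.toList_inj.mp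
        simp [PySem.Str.toList_join, PySem.Chars.join_cons_cons]
      rw [h1, ih b, joinSp_cons_cons]
      simp [String.append_assoc]

theorem joinSp_singleton (a : String) : PySem.Str.join " " [a] = a := by
  apply String.toList_inj.mp
  simp [PySem.Str.toList_join, PySem.Chars.join_singleton]

-- ---- bridge spec: the run decomposition, recursively ----
def pvRec : List (String × String) → List String × List String
  | [] => ([], [])
  | (l, s) :: rest =>
      let r := pvRec (rest.dropWhile (fun q => q.1 == l))
      (PySem.Str.join " " (s :: (rest.takeWhile (fun q => q.1 == l)).map Prod.snd) :: r.1,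
       l :: r.2)
termination_by xs => xs.length
decreasing_by
  simp only [List.length_cons]
  exact Nat.lt_succ_of_le (List.length_dropWhile_le _ _)

-- ---- generic list facts not found in the library (searched with exact?) ----
theorem pvDropWhile_eq_drop (p : α → Bool) : ∀ xs : List α,
    xs.dropWhile p = xs.drop (xs.takeWhile p).length := by
  intro xs
  induction xs with
  | nil => rfl
  | cons x t ih => by_cases h : p x <;> simp [h, ih]

theorem pvZip_drop : ∀ (n : Nat) (as : List α) (bs : List β),
    (as.zip bs).drop n = (as.drop n).zip (bs.drop n) := by
  intro n
  induction n with
  | zero => simp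
  | succ m ih => intro as bs; cases as <;> cases bs <;> simp [ih]

theorem pvTakeWhile_zip_snd (l : String) : ∀ (as : List String) (bs : List String),
    ((as.zip bs).takeWhile (fun q => q.1 == l)).map Prod.snd
      = bs.take ((as.zip bs).takeWhile (fun q => q.1 == l)).length := by
  intro as
  induction as with
  | nil => intro bs; simp
  | cons a at' ih =>
      intro bs
      cases bs with
      | nil => simp
      | cons b bt => by_cases h : a = l <;> simp [h, ih]

theorem pvTakeWhile_zip_len_le (l : String) : ∀ (as : List String) (bs : List String),
    ((as.zip bs).takeWhile (fun q => q.1 == l)).length ≤ bs.length := by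
  intro as
  induction as with
  | nil => intro bs; simp
  | cons a at' ih =>
      intro bs
      cases bs with
      | nil => simp
      | cons b bt =>
          by_cases h : a = l <;> simp [h]
          exact ih bt

theorem pvRun_prefix (l : String) : ∀ (lt st : List String) (j : Nat),
    j < ((lt.zip st).takeWhile (fun q => q.1 == l)).length → lt[j]? = some l := by
  intro lt
  induction lt with
  | nil => intro st j h; simp at h
  | cons a lt' ih =>
      intro st j h
      cases st with
      | nil => simp at h
      | cons b st' =>
          by_cases ha : a = l
          · cases j with
            | zero => simp [ha]
            | succ j' =>
                simp only [List.zip_cons_cons, List.takeWhile_cons, ha, beq_self_eq_true,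
                  List.length_cons, if_true] at h
                simpa using ih st' j' (by omega)
          · simp [ha] at h

theorem pvRun_stop (l : String) : ∀ (lt st : List String),
    ((lt.zip st).takeWhile (fun q => q.1 == l)).length < st.length →
    st.length ≤ lt.length →
    ∃ x, lt[((lt.zip st).takeWhile (fun q => q.1 == l)).length]? = some x ∧ (x == l) = false := by
  intro lt
  induction lt with
  | nil =>
      intro st h1 h2
      simp only [List.length_nil] at h2
      have hst : st = [] := List.eq_nil_of_length_eq_zero (by omega)
      subst hst
      simp at h1
  | cons a lt' ih =>
      intro st h1 h2
      cases st with
      | nil => simp at h1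
      | cons b st' =>
          by_cases ha : a = l
          · simp only [List.zip_cons_cons, List.takeWhile_cons, ha, beq_self_eq_true,
              List.length_cons, if_true] at h1 ⊢
            simp only [List.length_cons] at h2
            obtain ⟨x, hx, hxl⟩ := ih st' (by omega) (by omega)
            exact ⟨x, by simpa using hx, hxl⟩
          · refine ⟨a, ?_, ?_⟩
            · simp [ha]
            · simp [ha]

-- ---- Nat-level cut list ----
def pvCondN (langs : List String) (n i : Nat) : Bool :=
  i == 0 || i == n || !(langs.getD i "" == langs.getD (i - 1) "")

def pvCutsN (langs : List String) (n : Nat) : List Nat :=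
  (List.range (n + 1)).filter (pvCondN langs n)

-- the Int-level cut list of the port is the Nat-level one, cast
theorem pvCuts_cast (langs : List String) (n : Nat) :
    (PySem.List.pyRange 0 ((n : Int) + 1) 1).filter (pvCond langs (n : Int))
      = (pvCutsN langs n).map (fun k : Nat => (k : Int)) := by
  have h1 : ((n : Int) + 1) = ((n + 1 : Nat) : Int) := by push_cast; ring
  rw [h1, PySem.List.pyRange_zero_natCast, List.filter_map]
  unfold pvCutsN
  refine congrArg (List.map (fun k : Nat => (k : Int))) (List.filter_congr ?_)
  intro k hk
  simp only [List.mem_range] at hk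
  show pvCond langs (n : Int) (k : Int) = pvCondN langs n k
  cases k with
  | zero => simp [pvCond, pvCondN]
  | succ j =>
      have e1 : ((j + 1 : Nat) : Int) - 1 = ((j : Nat) : Int) := by push_cast; ring
      have b0 : (((j + 1 : Nat) : Int) == (0 : Int)) = false := by
        simp only [beq_eq_false_iff_ne]; omega
      have bn : (((j + 1 : Nat) : Int) == ((n : Nat) : Int)) = ((j + 1) == n) := by
        by_cases hj : j + 1 = n
        · simp [hj]
        · have e2 : ((j + 1 == n) : Bool) = false := by
            simp only [beq_eq_false_iff_ne]; omega
          have e3 : (((j + 1 : Nat) : Int) == ((n : Nat) : Int)) = false := by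
            simp only [beq_eq_false_iff_ne]
            intro hcon
            exact hj (by exact_mod_cast hcon)
          rw [e2, e3]
      simp only [pvCond, pvCondN, e1, PySem.List.pyGetD_natCast, b0, bn]
      simp

-- every cut list starts with 0
theorem pvCutsN_cons (langs : List String) (n : Nat) :
    ∃ r, pvCutsN langs n = 0 :: r := by
  unfold pvCutsN
  have h1 : (List.range 1).filter (pvCondN langs n) = [0] := by
    simp [List.range_one, pvCondN]
  rw [show n + 1 = 1 + n from by omega, List.range_add, List.filter_append, h1]
  exact ⟨_, rfl⟩

-- the shift lemma: the cut list of (l :: lt, |st| + 1) is 0 followed by the cut list of the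
-- input with the first run (of length k₀ + 1) removed, shifted by that run length
theorem pvCutsN_shift (l : String) (lt st : List String) (h : st.length ≤ lt.length) :
    pvCutsN (l :: lt) (st.length + 1)
      = 0 :: (pvCutsN (lt.drop ((lt.zip st).takeWhile (fun q => q.1 == l)).length)
                (st.length - ((lt.zip st).takeWhile (fun q => q.1 == l)).length)).map
              (fun x => (((lt.zip st).takeWhile (fun q => q.1 == l)).length + 1) + x) := by
  have hk₀ : ((lt.zip st).takeWhile (fun q => q.1 == l)).length ≤ st.length :=
    pvTakeWhile_zip_len_le l lt st
  have hpre := pvRun_prefix l lt st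
  have hstop := pvRun_stop l lt st
  generalize hgen : ((lt.zip st).takeWhile (fun q => q.1 == l)).length = k₀ at hk₀ hpre hstop ⊢
  have hgetrun : ∀ j, j < k₀ → (l :: lt).getD (j + 1) "" = l := by
    intro j hj
    have hpx := hpre j (by omega)
    simp [List.getD_eq_getElem?_getD, hpx]
  have hgetrun0 : ∀ j, j ≤ k₀ → (l :: lt).getD j "" = l := by
    intro j hj
    cases j with
    | zero => simp
    | succ j' => exact hgetrun j' (by omega)
  unfold pvCutsN
  have hsplit : st.length + 1 + 1 = (k₀ + 1) + ((st.length - k₀) + 1) := by omega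
  rw [hsplit, List.range_add, List.filter_append]
  have hpart1 : (List.range (k₀ + 1)).filter (pvCondN (l :: lt) (st.length + 1)) = [0] := by
    rw [show k₀ + 1 = 1 + k₀ from by omega, List.range_add, List.filter_append]
    have e1 : (List.range 1).filter (pvCondN (l :: lt) (st.length + 1)) = [0] := by
      simp [List.range_one, pvCondN]
    have e2 : ((List.range k₀).map (1 + ·)).filter (pvCondN (l :: lt) (st.length + 1)) = [] := by
      rw [List.filter_eq_nil_iff]
      intro x hx
      simp only [List.mem_map, List.mem_range] at hx
      obtain ⟨j, hj, rfl⟩ := hx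
      have hv1 : (l :: lt).getD (1 + j) "" = l := by
        rw [show 1 + j = j + 1 from by omega]; exact hgetrun j hj
      have hv2 : (l :: lt)[j]?.getD "" = l := by
        have hh := hgetrun0 j (by omega)
        rw [List.getD_eq_getElem?_getD] at hh
        exact hh
      have hne : ¬ (1 + j = st.length + 1) := by omega
      rw [List.getD_eq_getElem?_getD] at hv1
      simp [pvCondN, hne, List.getD_eq_getElem?_getD, hv1, hv2]
    rw [e1, e2, List.append_nil]
  rw [hpart1, List.singleton_append]
  congr 1
  rw [List.filter_map]
  refine congrArg (List.map fun x => k₀ + 1 + x) (List.filter_congr ?_)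
  intro i hi
  simp only [List.mem_range] at hi
  show pvCondN (l :: lt) (st.length + 1) (k₀ + 1 + i)
      = pvCondN (lt.drop k₀) (st.length - k₀) i
  have hgethigh : ∀ m, (l :: lt).getD (k₀ + 1 + m) "" = (lt.drop k₀).getD m "" := by
    intro m
    rw [show k₀ + 1 + m = (k₀ + m) + 1 from by omega]
    simp [List.getD_eq_getElem?_getD, List.getElem?_drop]
  cases i with
  | zero =>
      have hrhs : pvCondN (lt.drop k₀) (st.length - k₀) 0 = true := by simp [pvCondN]
      rw [hrhs]
      by_cases hend : k₀ = st.length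
      · have hb : ((k₀ + 1 + 0 == st.length + 1) : Bool) = true := by
          simp only [beq_iff_eq]; omega
        simp [pvCondN, hb]
      · obtain ⟨x, hx, hxl⟩ := hstop (by omega) h
        have hxl' : ¬ (x = l) := by simpa using hxl
        have hv1' : lt[k₀]?.getD "" = x := by rw [hx]; rfl
        have hv2' : (l :: lt)[k₀]?.getD "" = l := by
          have hh := hgetrun0 k₀ (le_refl _)
          rw [List.getD_eq_getElem?_getD] at hh
          exact hh
        simp [pvCondN]
        exact Or.inr (by rw [hv1', hv2']; exact hxl')
  | succ i' =>
      have hv1 : (l :: lt).getD (k₀ + 1 + (i' + 1)) "" = (lt.drop k₀).getD (i' + 1) "" :=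
        hgethigh (i' + 1)
      have hv2 : (l :: lt).getD (k₀ + 1 + (i' + 1) - 1) "" = (lt.drop k₀).getD i' "" := by
        rw [show k₀ + 1 + (i' + 1) - 1 = k₀ + 1 + i' from by omega, hgethigh i']
      have hn : ((k₀ + 1 + (i' + 1) == st.length + 1) : Bool) = ((i' + 1 == st.length - k₀) : Bool) := by
        by_cases he : i' + 1 = st.length - k₀
        · have e1 : ((k₀ + 1 + (i' + 1) == st.length + 1) : Bool) = true := by
            simp only [beq_iff_eq]; omega
          have e2 : ((i' + 1 == st.length - k₀) : Bool) = true := by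
            simp only [beq_iff_eq]; omega
          rw [e1, e2]
        · have e1 : ((k₀ + 1 + (i' + 1) == st.length + 1) : Bool) = false := by
            simp only [beq_eq_false_iff_ne]; omega
          have e2 : ((i' + 1 == st.length - k₀) : Bool) = false := by
            simp only [beq_eq_false_iff_ne]; omega
          rw [e1, e2]
      simp only [pvCondN, hv1, hv2, hn]
      have hz : ((k₀ + 1 + (i' + 1) == 0) : Bool) = false := by
        simp only [beq_eq_false_iff_ne]; omega
      simp [hz]

-- ---- A equals the run decomposition ----
theorem pvFoldA (rest : List (String × String)) :
    ∀ (a b : List String) (l : String) (cur : List String), cur ≠ [] →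
      rest.foldl pvStepA (a ++ [PySem.Str.join " " cur], b ++ [l]) =
        (a ++ (PySem.Str.join " " (cur ++ (rest.takeWhile (fun q => q.1 == l)).map Prod.snd)
                :: (pvRec (rest.dropWhile (fun q => q.1 == l))).1),
         b ++ (l :: (pvRec (rest.dropWhile (fun q => q.1 == l))).2)) := by
  induction rest with
  | nil => intro a b l cur _; simp [pvRec]
  | cons p rest ih =>
      intro a b l cur hcur
      obtain ⟨l₂, s₂⟩ := p
      obtain ⟨c, cs, rfl⟩ : ∃ c cs, cur = c :: cs := by
        cases cur with
        | nil => exact absurd rfl hcur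
        | cons c cs => exact ⟨c, cs, rfl⟩
      by_cases hc : l₂ = l
      · have hj := (joinSp_snoc c cs s₂).symm
        simp only [List.cons_append] at hj
        have hstep : pvStepA (a ++ [PySem.Str.join " " (c :: cs)], b ++ [l]) (l₂, s₂)
            = (a ++ [PySem.Str.join " " ((c :: cs) ++ [s₂])], b ++ [l]) := by
          simp [pvStepA, hc, hj]
        rw [List.foldl_cons, hstep, ih a b l ((c :: cs) ++ [s₂]) (by simp)]
        simp [hc]
      · have hstep : pvStepA (a ++ [PySem.Str.join " " (c :: cs)], b ++ [l]) (l₂, s₂)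
            = ((a ++ [PySem.Str.join " " (c :: cs)]) ++ [s₂], (b ++ [l]) ++ [l₂]) := by
          simp [pvStepA, hc]
        have hih := ih (a ++ [PySem.Str.join " " (c :: cs)]) (b ++ [l]) l₂ [s₂] (by simp)
        rw [joinSp_singleton] at hih
        rw [List.foldl_cons, hstep, hih]
        have hcb : ((l₂ == l) : Bool) = false := by simp [hc]
        simp [hcb, pvRec]

theorem pvA_eq_pvRec (sentences langs : List String)
    (hpre : sentences = [] ∨ sentences.length ≤ langs.length) :
    merge_same_language_sentences sentences langs = pvRec (langs.zip sentences) := by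
  cases sentences with
  | nil => simp [merge_same_language_sentences, pvRec]
  | cons s st =>
      cases langs with
      | nil =>
          rcases hpre with h | h
          · exact absurd h (List.cons_ne_nil s st)
          · simp at h
      | cons l lt =>
          unfold merge_same_language_sentences
          have h0 : (([s] : List String), ([l] : List String))
              = (([] : List String) ++ [PySem.Str.join " " [s]], ([] : List String) ++ [l]) := by
            simp [joinSp_singleton]
          simp only [List.cons_ne_nil, List.zip_cons_cons, List.drop_succ_cons,
            List.drop_zero, List.headD_cons, ite_false]
          rw [h0, pvFoldA (lt.zip st) [] [] l [s] (by simp)]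
          simp [pvRec]

-- ---- B equals the run decomposition ----
-- rendering of a Nat-level cut list, exactly as the port renders its Int cut list
def pvRender (sentences langs : List String) (C : List Nat) : List String × List String :=
  (((C.map (fun k : Nat => (k : Int))).zip ((C.map (fun k : Nat => (k : Int))).drop 1)).map
      (fun p => PySem.Str.join " " (PySem.List.slice sentences (some p.1) (some p.2))),
   (C.map (fun k : Nat => (k : Int))).dropLast.map (fun a => PySem.List.pyGetD langs a ""))

theorem pvAlt_eq_render (sentences langs : List String) :
    merge_same_language_sentences_alt sentences langs
      = pvRender sentences langs (pvCutsN langs sentences.length) := by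
  unfold merge_same_language_sentences_alt pvRender
  simp only
  rw [pvCuts_cast langs sentences.length]

theorem pvMapZipMap {γ : Type} (f : Int × Int → γ) (G : Nat → Int) (C : List Nat) :
    ((C.map G).zip ((C.map G).drop 1)).map f
      = (C.zip (C.drop 1)).map (fun q => f (G q.1, G q.2)) := by
  rw [← List.map_drop, List.zip_map, List.map_map]
  apply List.map_congr_left
  intro q _
  obtain ⟨a, b⟩ := q
  rfl

theorem pvRender_shift (l s : String) (lt st : List String) (k₀ : Nat) (T' : List Nat) :
    pvRender (s :: st) (l :: lt) (0 :: (0 :: T').map (fun x => (k₀ + 1) + x))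
      = (PySem.Str.join " " (s :: st.take k₀) :: (pvRender (st.drop k₀) (lt.drop k₀) (0 :: T')).1,
         l :: (pvRender (st.drop k₀) (lt.drop k₀) (0 :: T')).2) := by
  have hslice : ∀ a b : Nat,
      PySem.List.slice (s :: st) (some ((k₀ + 1 + a : Nat) : Int)) (some ((k₀ + 1 + b : Nat) : Int))
        = PySem.List.slice (st.drop k₀) (some ((a : Nat) : Int)) (some ((b : Nat) : Int)) := by
    intro a b
    rw [PySem.List.slice_natCast, PySem.List.slice_natCast,
      show k₀ + 1 + a = (k₀ + a) + 1 from by omega, List.drop_succ_cons, List.drop_drop,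
      show k₀ + 1 + b - (k₀ + a + 1) = b - a from by omega]
  have hget : ∀ x : Nat,
      PySem.List.pyGetD (l :: lt) ((k₀ + 1 + x : Nat) : Int) ""
        = PySem.List.pyGetD (lt.drop k₀) ((x : Nat) : Int) "" := by
    intro x
    rw [PySem.List.pyGetD_natCast, PySem.List.pyGetD_natCast,
      show k₀ + 1 + x = (k₀ + x) + 1 from by omega]
    simp [List.getD_eq_getElem?_getD, List.getElem?_drop]
  have hC : (0 :: (0 :: T').map (fun x => (k₀ + 1) + x)).map (fun k : Nat => (k : Int))
      = ((0 : Nat) : Int) :: (0 :: T').map (fun x : Nat => ((k₀ + 1 + x : Nat) : Int)) := by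
    simp only [List.map_cons, List.map_map]
    rfl
  set G : Nat → Int := fun x : Nat => ((k₀ + 1 + x : Nat) : Int) with hG
  unfold pvRender
  rw [hC]
  refine Prod.ext ?_ ?_
  · -- merged-sentences component
    show ((((0 : Nat) : Int) :: (0 :: T').map G).zip
            ((((0 : Nat) : Int) :: (0 :: T').map G).drop 1)).map
          (fun p => PySem.Str.join " " (PySem.List.slice (s :: st) (some p.1) (some p.2)))
        = _
    rw [show ((0 : Nat) :: T').map G = G 0 :: T'.map G from rfl, List.drop_succ_cons,
      List.drop_zero, List.zip_cons_cons,
      show (G 0 :: T'.map G).zip (T'.map G) = ((0 :: T').map G).zip (((0 :: T').map G).drop 1) from rfl]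
    rw [List.map_cons, pvMapZipMap, pvMapZipMap]
    have hhead : PySem.List.slice (s :: st) (some ((0 : Nat) : Int)) (some (G 0))
        = s :: st.take k₀ := by
      rw [hG]
      show PySem.List.slice (s :: st) (some ((0 : Nat) : Int)) (some ((k₀ + 1 + 0 : Nat) : Int)) = _
      rw [PySem.List.slice_natCast]
      simp [List.take_succ_cons]
    rw [hhead]
    refine congrArg _ (List.map_congr_left ?_)
    intro q _
    obtain ⟨a, b⟩ := q
    show PySem.Str.join " " (PySem.List.slice (s :: st) (some (G a)) (some (G b)))
        = PySem.Str.join " " (PySem.List.slice (st.drop k₀) (some ((a : Nat) : Int)) (some ((b : Nat) : Int)))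
    exact congrArg _ (hslice a b)
  · -- merged-langs component
    show ((((0 : Nat) : Int) :: (0 :: T').map G).dropLast).map
          (fun a => PySem.List.pyGetD (l :: lt) a "")
        = _
    rw [List.dropLast_cons_of_ne_nil (by simp), ← List.map_dropLast, ← List.map_dropLast,
      List.map_cons, List.map_map, List.map_map]
    have hhd : PySem.List.pyGetD (l :: lt) ((0 : Nat) : Int) "" = l := by
      rw [PySem.List.pyGetD_natCast]; simp
    rw [hhd]
    refine congrArg _ (List.map_congr_left ?_)
    intro x _
    show PySem.List.pyGetD (l :: lt) (G x) "" = PySem.List.pyGetD (lt.drop k₀) ((x : Nat) : Int) ""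
    exact hget x

theorem pvB_eq_pvRec : ∀ (N : Nat) (sentences langs : List String),
    sentences.length ≤ N → sentences.length ≤ langs.length →
    merge_same_language_sentences_alt sentences langs = pvRec (langs.zip sentences) := by
  intro N
  induction N with
  | zero =>
      intro sentences langs hN _
      have h0 : sentences = [] := List.length_eq_zero_iff.mp (by omega)
      subst h0
      rw [pvAlt_eq_render]
      have hcuts : pvCutsN langs ([] : List String).length = [0] := by
        unfold pvCutsN
        simp [List.range_one, pvCondN]
      rw [hcuts]
      simp [pvRender, pvRec]
  | succ N ih =>
      intro sentences langs hN hlen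
      cases sentences with
      | nil =>
          rw [pvAlt_eq_render]
          have hcuts : pvCutsN langs ([] : List String).length = [0] := by
            unfold pvCutsN
            simp [List.range_one, pvCondN]
          rw [hcuts]
          simp [pvRender, pvRec]
      | cons s st =>
          cases langs with
          | nil => simp at hlen
          | cons l lt =>
              simp only [List.length_cons] at hN hlen
              set k₀ := ((lt.zip st).takeWhile (fun q => q.1 == l)).length with hk₀def
              obtain ⟨T', hT'⟩ := pvCutsN_cons (lt.drop k₀) (st.length - k₀)
              rw [pvAlt_eq_render, show (s :: st).length = st.length + 1 from rfl,
                pvCutsN_shift l lt st (by omega), ← hk₀def, hT', pvRender_shift]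
              have hrender : pvRender (st.drop k₀) (lt.drop k₀) (0 :: T')
                  = pvRec ((lt.zip st).dropWhile (fun q => q.1 == l)) := by
                rw [← hT',
                  show st.length - k₀ = (st.drop k₀).length from (List.length_drop).symm,
                  ← pvAlt_eq_render,
                  ih (st.drop k₀) (lt.drop k₀)
                    (by rw [List.length_drop]; omega)
                    (by rw [List.length_drop, List.length_drop]; omega),
                  ← pvZip_drop, pvDropWhile_eq_drop, ← hk₀def]
              rw [hrender]
              have hrun : st.take k₀
                  = ((lt.zip st).takeWhile (fun q => q.1 == l)).map Prod.snd := by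
                rw [hk₀def]; exact (pvTakeWhile_zip_snd l lt st).symm
              have hpv : pvRec ((l, s) :: lt.zip st)
                  = (PySem.Str.join " "
                      (s :: ((lt.zip st).takeWhile (fun q => q.1 == l)).map Prod.snd)
                        :: (pvRec ((lt.zip st).dropWhile (fun q => q.1 == l))).1,
                     l :: (pvRec ((lt.zip st).dropWhile (fun q => q.1 == l))).2) := by
                rw [pvRec]
              rw [List.zip_cons_cons, hpv, hrun]

-- ===== VERDICT (by name: the statement is the Claim_ definition above) =====
theorem merge_same_language_sentences_spec : Claim_equal_merge_same_language_sentences := by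
  intro sentences langs _ hpre
  unfold Spec_merge_same_language_sentences
  rw [pvA_eq_pvRec sentences langs hpre]
  rcases hpre with h | h
  · subst h
    exact (pvB_eq_pvRec 0 [] langs (by simp) (by simp)).symm
  · exact (pvB_eq_pvRec sentences.length sentences langs le_rfl h).symm
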